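-- pv_equiv track=rewrite | github.com/PosoSAgapo/PosoSAgapo.github.io | scripts/publish_album.py | render_album_md
-- ===== SOURCE A (Python) =====
-- def render_album_md(slug: str, title: str, date_str: str, teaser_url: str) -> str:
--     front_matter = {
--         "title": title,
--         "date": date_str,
--         "header": {"teaser": teaser_url},
--         "dir": "",
--         "data_key": f"albums.{slug}",
--         "author_profile": False,
--     }
--     # Minimal front matter writer
--     lines = ["---"]
--     for k, v in front_matter.items():
--         if isinstance(v, dict):
--             lines.append(f"{k}:")
--             for kk, vv in v.items():
--                 lines.append(f"  {kk}: {vv}")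
--         else:
--             lines.append(f"{k}: {v}")
--     lines.append("---")
--     lines.append("")
--     lines.append("{% include auto_gallery.html data_key=page.data_key caption=page.title layout=\"masonry\" %}")
--     lines.append("")
--     return "\n".join(lines)
-- ===== SOURCE B (Python) =====
-- def render_album_md(slug: str, title: str, date_str: str, teaser_url: str) -> str:
--     return (
--         "---\n"
--         f"title: {title}\n"
--         f"date: {date_str}\n"
--         "header:\n"
--         f"  teaser: {teaser_url}\n"
--         "dir: \n"
--         f"data_key: albums.{slug}\n"
--         "author_profile: False\n"
--         "---\n"
--         "\n"
--         "{% include auto_gallery.html data_key=page.data_key caption=page.title layout=\"masonry\" %}\n"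
--     )
-- ===== Notes on version B (the rewrite author's own statement) =====
-- stated objective: simpler
-- what changed: Replaced A's dict construction and isinstance-dispatching loop over front-matter entries by one direct literal template: a single concatenation that hardcodes each line in order (no dict, no loop, no type dispatch).
import Mathlib
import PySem

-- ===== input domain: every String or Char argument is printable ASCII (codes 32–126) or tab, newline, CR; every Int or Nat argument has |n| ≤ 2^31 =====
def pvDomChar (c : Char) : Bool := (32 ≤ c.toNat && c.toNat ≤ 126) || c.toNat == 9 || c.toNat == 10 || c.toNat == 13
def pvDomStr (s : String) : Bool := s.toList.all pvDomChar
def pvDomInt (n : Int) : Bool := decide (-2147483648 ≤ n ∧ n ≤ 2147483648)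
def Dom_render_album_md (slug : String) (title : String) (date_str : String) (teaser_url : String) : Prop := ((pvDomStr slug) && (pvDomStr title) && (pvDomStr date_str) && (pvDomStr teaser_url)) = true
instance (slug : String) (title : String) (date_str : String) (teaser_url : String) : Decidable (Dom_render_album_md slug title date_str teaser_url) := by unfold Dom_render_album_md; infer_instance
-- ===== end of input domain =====

-- B replaces A's dict + isinstance-dispatch loop by one direct literal template (simpler; same output).

-- ===== PORT A =====
-- value of the front-matter dict: a string, a nested dict, or a bool (A's three value types)
inductive FmVal where
  | str : String → FmVal
  | dict : List (String × String) → FmVal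
  | bool : Bool → FmVal

-- f"{v}" for a non-dict value (Python str(): bool renders as 'True'/'False')
def fmValStr : FmVal → String
  | .str v => v
  | .bool b => if b then "True" else "False"
  | .dict _ => ""   -- unreachable: the dict branch is taken before

def render_album_md (slug : String) (title : String) (date_str : String) (teaser_url : String) : String :=
  let front_matter : List (String × FmVal) :=
    [("title", .str title), ("date", .str date_str),
     ("header", .dict [("teaser", teaser_url)]),
     ("dir", .str ""), ("data_key", .str ("albums." ++ slug)),
     ("author_profile", .bool false)]
  let lines := ["---"]
  let lines := front_matter.foldl (fun lines kv =>
    match kv.2 with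
    | .dict d => (d.foldl (fun ls kkvv => ls ++ ["  " ++ kkvv.1 ++ ": " ++ kkvv.2]) (lines ++ [kv.1 ++ ":"]))
    | v => lines ++ [kv.1 ++ ": " ++ fmValStr v]) lines
  let lines := lines ++ ["---", "", "{% include auto_gallery.html data_key=page.data_key caption=page.title layout=\"masonry\" %}", ""]
  PySem.Str.join "\n" lines

-- ===== PORT B =====
def render_album_md_alt (slug : String) (title : String) (date_str : String) (teaser_url : String) : String :=
  "---\n" ++
  "title: " ++ title ++ "\n" ++
  "date: " ++ date_str ++ "\n" ++
  "header:\n" ++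
  "  teaser: " ++ teaser_url ++ "\n" ++
  "dir: \n" ++
  "data_key: albums." ++ slug ++ "\n" ++
  "author_profile: False\n" ++
  "---\n" ++
  "\n" ++
  "{% include auto_gallery.html data_key=page.data_key caption=page.title layout=\"masonry\" %}\n"

-- ===== PRECONDITION & SPEC =====
def Spec_render_album_md (slug : String) (title : String) (date_str : String) (teaser_url : String) (out : String) : Prop := out = render_album_md_alt slug title date_str teaser_url
instance (slug : String) (title : String) (date_str : String) (teaser_url : String) (out : String) : Decidable (Spec_render_album_md slug title date_str teaser_url out) := by unfold Spec_render_album_md; infer_instance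

-- ===== CLAIM (what is proved, stated in full; the proofs are below) =====
def Claim_equal_render_album_md : Prop := ∀ (slug : String) (title : String) (date_str : String) (teaser_url : String), Dom_render_album_md slug title date_str teaser_url → Spec_render_album_md slug title date_str teaser_url (render_album_md slug title date_str teaser_url)

-- ===== LEMMAS AND PROOFS =====

-- ===== VERDICT (by name: the statement is the Claim_ definition above) =====
theorem render_album_md_spec : Claim_equal_render_album_md := by
  intro slug title date_str teaser_url _
  show render_album_md slug title date_str teaser_url = render_album_md_alt slug title date_str teaser_url
  apply String.toList_injective
  simp [render_album_md, render_album_md_alt, PySem.Str.join, PySem.Chars.join, List.foldl, fmValStr, List.intercalate, List.intersperse]
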